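-- pv_equiv track=rewrite | github.com/KodiTheDog/kobocollections | kobocollections.py | get_collection_path
-- ===== SOURCE A (Python) =====
-- def get_collection_path(tags):
--     """
--     Returns the collection path from tags. Supports:
--       - #KB Something/Path  (single tag)
--       - #KB, Tag1, Tag2, ..., #KB  (delimited group)
--     """
--     collecting = False
--     parts = []
--     for t in tags:
--         if t == "#KB":
--             if collecting:
--                 break   # stop collecting at second #KB
--             else:
--                 collecting = True
--                 continue
--         if t.startswith("#KB "):
--             # single tag style: use the string after '#KB '
--             return t[4:].strip()
--         if collecting:
--             # Split on commas in tag and collect parts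
--             parts.extend(p.strip() for p in t.split(",") if p.strip())
--     if parts:
--         return "/".join(parts)
--     return ""
-- ===== SOURCE B (Python) =====
-- def get_collection_path(tags):
--     """Locate the '#KB' delimiters first, then work on slices: one scan for a
--     single-tag '#KB ...' hit over everything before the closing delimiter, and
--     one comprehension collecting the comma-split parts of the delimited group."""
--     tags = list(tags)
--     if "#KB" in tags:
--         i = tags.index("#KB")
--         r = tags[i + 1:]
--         seg = r[:r.index("#KB")] if "#KB" in r else r
--         scanned = tags[:i] + seg
--     else:
--         seg, scanned = [], tags
--     hit = next((t for t in scanned if t.startswith("#KB ")), None)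
--     if hit is not None:
--         return hit[4:].strip()
--     return "/".join(p.strip() for t in seg for p in t.split(",") if p.strip())
-- ===== Notes on version B (the rewrite author's own statement) =====
-- stated objective: alternative
-- what changed: Replaces the stateful single pass (collecting flag, break, in-loop return) by a delimiter-location phase: find the '#KB' indices, slice out the scanned region and the delimited group, then one scan for a '#KB '-prefixed tag and one comprehension for the comma-split parts.
import Mathlib
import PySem

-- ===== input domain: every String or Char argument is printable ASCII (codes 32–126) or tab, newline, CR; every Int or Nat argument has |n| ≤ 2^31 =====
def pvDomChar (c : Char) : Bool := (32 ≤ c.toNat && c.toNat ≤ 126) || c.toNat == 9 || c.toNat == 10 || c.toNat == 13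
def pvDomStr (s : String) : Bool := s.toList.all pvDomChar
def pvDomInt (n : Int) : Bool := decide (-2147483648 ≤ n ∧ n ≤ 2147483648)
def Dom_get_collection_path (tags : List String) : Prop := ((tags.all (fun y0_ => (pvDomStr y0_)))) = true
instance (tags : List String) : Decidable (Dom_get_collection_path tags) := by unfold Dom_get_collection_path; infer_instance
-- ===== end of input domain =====

-- B restructures A's stateful single pass into delimiter location + slice scans; return values proved equal on all inputs.

-- shared subexpression of both Pythons: [p.strip() for p in t.split(",") if p.strip()]
def pvSplitParts (t : String) : List String :=
  (((PySem.Str.split? t ",").getD []).map PySem.Str.strip).filter (fun p => p != "")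

-- ===== PORT A =====
-- the function epilogue ('if parts: return "/".join(parts); return ""'), reached at end of list and at break
def pvFin (parts : List String) : String :=
  if parts.isEmpty then "" else PySem.Str.join "/" parts

def pvGoA : List String → Bool → List String → String
  | [], _, parts => pvFin parts
  | t :: rest, collecting, parts =>
    if t = "#KB" then
      if collecting then pvFin parts            -- break
      else pvGoA rest true parts                -- continue, now collecting
    else if PySem.Str.startswith t "#KB " then
      PySem.Str.strip (PySem.Str.slice t (some 4) none)   -- return t[4:].strip()
    else if collecting then
      pvGoA rest collecting (parts ++ pvSplitParts t)
    else pvGoA rest collecting parts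

def get_collection_path (tags : List String) : String := pvGoA tags false []

-- ===== PORT B =====
def get_collection_path_alt (tags : List String) : String :=
  let p :=
    match PySem.List.index? tags "#KB" with    -- 'if "#KB" in tags: i = tags.index("#KB")'
    | some i =>
      let r := PySem.List.slice tags (some ((i : Int) + 1)) none
      let seg :=
        match PySem.List.index? r "#KB" with   -- 'r[:r.index("#KB")] if "#KB" in r else r'
        | some k => PySem.List.slice r none (some (k : Int))
        | none => r
      (seg, PySem.List.slice tags none (some (i : Int)) ++ seg)
    | none => ([], tags)
  match p.2.find? (fun t => PySem.Str.startswith t "#KB ") with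
  | some t => PySem.Str.strip (PySem.Str.slice t (some 4) none)
  | none => PySem.Str.join "/" (p.1.flatMap pvSplitParts)

-- ===== PRECONDITION & SPEC =====
def Spec_get_collection_path (tags : List String) (out : String) : Prop := out = get_collection_path_alt tags
instance (tags : List String) (out : String) : Decidable (Spec_get_collection_path tags out) := by unfold Spec_get_collection_path; infer_instance

-- ===== CLAIM (what is proved, stated in full; the proofs are below) =====
def Claim_equal_get_collection_path : Prop := ∀ (tags : List String), Dom_get_collection_path tags → Spec_get_collection_path tags (get_collection_path tags)

-- ===== LEMMAS AND PROOFS =====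

-- takeWhile/dropWhile normal form shared by the two equivalence halves
def pvTW (tags : List String) : String :=
  let pre0 := tags.takeWhile (fun t => t != "#KB")
  let seg := ((tags.dropWhile (fun t => t != "#KB")).tail).takeWhile (fun t => t != "#KB")
  match (pre0 ++ seg).find? (fun t => PySem.Str.startswith t "#KB ") with
  | some t => PySem.Str.strip (PySem.Str.slice t (some 4) none)
  | none => PySem.Str.join "/" (seg.flatMap pvSplitParts)

lemma pvFin_eq_join (l : List String) : pvFin l = PySem.Str.join "/" l := by
  cases l with
  | nil => rfl
  | cons a t => simp [pvFin]

lemma pvIndex_eq (v : String) (xs : List String) :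
    PySem.List.index? xs v =
      if xs.contains v then some (xs.takeWhile (fun t => t != v)).length else none := by
  induction xs with
  | nil => rfl
  | cons a xs ih =>
    by_cases ha : a = v
    · subst ha
      simp [PySem.List.index?, List.idxOf?_cons]
    · have hbne : (a != v) = true := by simp [bne_iff_ne, ha]
      simp only [PySem.List.index?] at ih ⊢
      rw [List.idxOf?_cons]
      by_cases hc : xs.contains v <;>
        simp [ha, hbne, hc, ih, List.takeWhile_cons, beq_iff_eq, Ne.symm ha]

lemma pvGoA_true (tags : List String) (parts : List String) :
    pvGoA tags true parts =
      match (tags.takeWhile (fun t => t != "#KB")).find?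
          (fun t => PySem.Str.startswith t "#KB ") with
      | some t => PySem.Str.strip (PySem.Str.slice t (some 4) none)
      | none => pvFin (parts ++ (tags.takeWhile (fun t => t != "#KB")).flatMap pvSplitParts) := by
  induction tags generalizing parts with
  | nil => simp [pvGoA]
  | cons t rest ih =>
    by_cases hk : t = "#KB"
    · subst hk
      simp [pvGoA, List.takeWhile_cons]
    · have hbne : (t != "#KB") = true := by simp [bne_iff_ne, hk]
      by_cases hh : PySem.Str.startswith t "#KB " = true
      · have hh2 : PySem.Chars.startswith t.toList ['#', 'K', 'B', ' '] = true := by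
          simpa using hh
        simp [pvGoA, hk, hh, hh2, List.takeWhile_cons, hbne, List.find?_cons]
      · have hh' : PySem.Str.startswith t "#KB " = false := by
          simpa using hh
        have hh2 : PySem.Chars.startswith t.toList ['#', 'K', 'B', ' '] = false := by
          simpa using hh'
        simp only [pvGoA, if_neg hk, hh', Bool.false_eq_true, if_false,
          List.takeWhile_cons, hbne, if_true, List.find?_cons, ih]
        cases hf : ((rest.takeWhile (fun t => t != "#KB")).find?
            (fun t => PySem.Str.startswith t "#KB ")) <;>
          simp_all [List.flatMap_cons, List.append_assoc]

lemma pvGoA_false_eq_tw (tags : List String) : pvGoA tags false [] = pvTW tags := by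
  induction tags with
  | nil => rfl
  | cons t rest ih =>
    by_cases hk : t = "#KB"
    · subst hk
      have hfalse : (("#KB" : String) != "#KB") = false := by decide
      simp only [pvTW, List.takeWhile_cons, List.dropWhile_cons, hfalse, Bool.false_eq_true,
        if_false, List.tail_cons, List.nil_append]
      simp only [pvGoA, if_pos rfl]
      rw [pvGoA_true rest []]
      cases hf : ((rest.takeWhile (fun t => t != "#KB")).find?
          (fun t => PySem.Str.startswith t "#KB ")) <;>
        simp [hf, pvFin_eq_join]
    · have hbne : (t != "#KB") = true := by simp [bne_iff_ne, hk]
      by_cases hh : PySem.Str.startswith t "#KB " = true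
      · have hh2 : PySem.Chars.startswith t.toList ['#', 'K', 'B', ' '] = true := by
          simpa using hh
        simp [pvGoA, pvTW, hk, hh, hh2, List.takeWhile_cons, hbne, List.find?_cons]
      · have hh' : PySem.Str.startswith t "#KB " = false := by simpa using hh
        have hh2 : PySem.Chars.startswith t.toList ['#', 'K', 'B', ' '] = false := by
          simpa using hh'
        simp only [pvGoA, if_neg hk, hh', Bool.false_eq_true, if_false, ih]
        simp [pvTW, List.takeWhile_cons, List.dropWhile_cons, hbne, List.find?_cons, hh2]

lemma pvTakeWhile_eq_self_of_not_contains {v : String} {xs : List String}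
    (h : xs.contains v = false) : xs.takeWhile (fun t => t != v) = xs := by
  rw [List.takeWhile_eq_self_iff]
  intro x hx
  simp only [List.contains_eq_any_beq] at h
  simp only [bne_iff_ne, ne_eq, decide_eq_true_eq]
  intro hxv
  subst hxv
  simp [List.any_eq_false] at h
  exact (h x hx) rfl

lemma pvAlt_eq_tw (tags : List String) : get_collection_path_alt tags = pvTW tags := by
  unfold get_collection_path_alt
  rw [pvIndex_eq "#KB" tags]
  by_cases hc : tags.contains "#KB"
  · rw [if_pos hc]
    dsimp only
    set n := (tags.takeWhile (fun t => t != "#KB")).length with hn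
    have hpre : tags.takeWhile (fun t => t != "#KB") = tags.take n :=
      List.prefix_iff_eq_take.mp (List.takeWhile_prefix _)
    have hsplit : tags.takeWhile (fun t => t != "#KB") ++ tags.dropWhile (fun t => t != "#KB") = tags :=
      List.takeWhile_append_dropWhile
    have hdropn : tags.drop n = tags.dropWhile (fun t => t != "#KB") := by
      conv_lhs => rw [← hsplit]
      rw [List.drop_left' (by rw [hn])]
    have hdrop : tags.drop (n + 1) = (tags.dropWhile (fun t => t != "#KB")).tail := by
      rw [← List.tail_drop, hdropn]
    have hs1 := PySem.List.slice_from (xs := tags) (a := (n : Int) + 1) (by omega)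
    have hs2 := PySem.List.slice_to (xs := tags) (b := (n : Int)) (by omega)
    have hcast1 : ((n : Int) + 1).toNat = n + 1 := by omega
    have hcast2 : ((n : Int)).toNat = n := by omega
    rw [hcast1] at hs1
    rw [hcast2] at hs2
    rw [hs1, hs2, hdrop, ← hpre]
    set r := (tags.dropWhile (fun t => t != "#KB")).tail with hr
    rw [pvIndex_eq "#KB" r]
    by_cases hrc : r.contains "#KB"
    · rw [if_pos hrc]
      dsimp only
      have hpre2 : r.takeWhile (fun t => t != "#KB") =
          r.take (r.takeWhile (fun t => t != "#KB")).length :=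
        List.prefix_iff_eq_take.mp (List.takeWhile_prefix _)
      have hs3 := PySem.List.slice_to (xs := r)
        (b := ((r.takeWhile (fun t => t != "#KB")).length : Int)) (by omega)
      rw [Int.toNat_natCast] at hs3
      rw [hs3, ← hpre2]
      unfold pvTW
      rw [← hr]
    · rw [if_neg hrc]
      dsimp only
      have hseg : r.takeWhile (fun t => t != "#KB") = r :=
        pvTakeWhile_eq_self_of_not_contains (by simpa using hrc)
      unfold pvTW
      rw [← hr, hseg]
  · rw [if_neg hc]
    dsimp only
    have h1 : tags.takeWhile (fun t => t != "#KB") = tags :=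
      pvTakeWhile_eq_self_of_not_contains (by simpa using hc)
    have h2 : tags.dropWhile (fun t => t != "#KB") = [] := by
      have := List.takeWhile_append_dropWhile (p := fun t => t != "#KB") (l := tags)
      rw [h1] at this
      simpa using this
    simp only [pvTW, h1, h2, List.tail_nil, List.takeWhile_nil, List.append_nil]

-- ===== VERDICT (by name: the statement is the Claim_ definition above) =====
theorem get_collection_path_spec : Claim_equal_get_collection_path := by
  intro tags _
  unfold Spec_get_collection_path get_collection_path
  rw [pvGoA_false_eq_tw, pvAlt_eq_tw]
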